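-- pv_equiv track=rewrite | github.com/waszil/pyxcp | pyxcp/transport/can.py | setDLC
-- ===== SOURCE A (Python) =====
-- def setDLC(length: int):
--     """Return DLC value according to CAN-FD.
--
--     :param length: Length value to be mapped to a valid CAN-FD DLC.
--                    ( 0 <= length <= 64)
--     """
--     FD_DLCS = (12, 16, 20, 24, 32, 48, 64)
--
--     if length < 0:
--         raise ValueError("Non-negative length value required.")
--     elif length <= 8:
--         return length
--     elif length <= 64:
--         for dlc in FD_DLCS:
--             if length <= dlc:
--                 return dlc
--     else:
--         raise ValueError("DLC could be at most 64.")
-- ===== SOURCE B (Python) =====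
-- _DLC_TABLE = tuple(range(9)) + (12,) * 4 + (16,) * 4 + (20,) * 4 + (24,) * 4 + (32,) * 8 + (48,) * 16 + (64,) * 16
--
-- def setDLC(length: int):
--     """Return DLC value according to CAN-FD (precomputed lookup table)."""
--     if length < 0:
--         raise ValueError("Non-negative length value required.")
--     if length > 64:
--         raise ValueError("DLC could be at most 64.")
--     return _DLC_TABLE[length]
-- ===== Notes on version B (the rewrite author's own statement) =====
-- stated objective: simpler
-- what changed: Replaces the per-call linear scan of the FD_DLCS tuple with a single indexing into a 65-entry lookup table built once at module load.
import Mathlib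
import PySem

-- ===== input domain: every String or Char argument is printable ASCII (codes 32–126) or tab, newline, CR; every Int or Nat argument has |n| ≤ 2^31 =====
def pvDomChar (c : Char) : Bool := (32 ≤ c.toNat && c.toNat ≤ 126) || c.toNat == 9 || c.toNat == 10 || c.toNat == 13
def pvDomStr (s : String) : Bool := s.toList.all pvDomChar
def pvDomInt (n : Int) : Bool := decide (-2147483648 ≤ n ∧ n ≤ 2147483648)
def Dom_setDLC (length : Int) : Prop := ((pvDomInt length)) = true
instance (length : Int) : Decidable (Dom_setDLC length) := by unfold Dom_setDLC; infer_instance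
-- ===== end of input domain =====

-- B replaces A's per-call linear scan of FD_DLCS with one index into a precomputed 65-entry table (simpler lookup).


-- ===== PORT A =====
-- the 'for dlc in FD_DLCS' loop: first dlc with length <= dlc; [] is unreachable for 8 < length <= 64 (Python would return None)
def setDLCLoop (length : Int) : List Int → Int
  | [] => 0
  | dlc :: rest => if length ≤ dlc then dlc else setDLCLoop length rest

def setDLC (length : Int) : Int :=
  if length < 0 then 0          -- raise ValueError: excluded by Pre_setDLC
  else if length ≤ 8 then length
  else if length ≤ 64 then setDLCLoop length [12, 16, 20, 24, 32, 48, 64]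
  else 0                        -- raise ValueError: excluded by Pre_setDLC

-- ===== PORT B =====
def dlcTable : List Int :=
  (List.range 9).map Int.ofNat ++ List.replicate 4 12 ++ List.replicate 4 16 ++
  List.replicate 4 20 ++ List.replicate 4 24 ++ List.replicate 8 32 ++
  List.replicate 16 48 ++ List.replicate 16 64

def setDLC_alt (length : Int) : Int :=
  if length < 0 then 0          -- raise ValueError: excluded by Pre_setDLC
  else if length > 64 then 0    -- raise ValueError: excluded by Pre_setDLC
  else (PySem.List.pyGet? dlcTable length).getD 0

-- ===== PRECONDITION & SPEC =====
-- Pre_ excludes exactly the inputs on which A raises ValueError: length < 0 or length > 64.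
def Pre_setDLC (length : Int) : Prop := 0 ≤ length ∧ length ≤ 64
instance (length : Int) : Decidable (Pre_setDLC length) := by unfold Pre_setDLC; infer_instance
def pvWitness_setDLC : Int := (10)
def Spec_setDLC (length : Int) (out : Int) : Prop := out = setDLC_alt length
instance (length : Int) (out : Int) : Decidable (Spec_setDLC length out) := by unfold Spec_setDLC; infer_instance

-- ===== CLAIM (what is proved, stated in full; the proofs are below) =====
def Claim_equal_setDLC : Prop := ∀ (length : Int), Dom_setDLC length → Pre_setDLC length → Spec_setDLC length (setDLC length)

-- ===== LEMMAS AND PROOFS =====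

-- ===== VERDICT (by name: the statement is the Claim_ definition above) =====
theorem setDLC_spec : Claim_equal_setDLC := by
  intro length _ hp
  obtain ⟨h0, h64⟩ := hp
  unfold Spec_setDLC
  interval_cases length <;> decide
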